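-- pv_equiv track=rewrite | github.com/RyanPBlake/coal-project | coal-curve-uk.py | nearArea
-- ===== SOURCE A (Python) =====
-- def nearArea(current_location, dt):
--     foo = []
--     for i in range(len(current_location)):
--         temp1 = current_location[:]
--         temp2 = current_location[:]
--         temp1[i] = temp1[i]+dt
--         temp2[i] = temp2[i]-dt
--         if temp2[i] < 0 or temp2[i] == 0 : #realistically no coefficient should ever be negative or 0
--             temp2[i] = dt
--         #don't add the temp if it is already in foo
--         if temp1 not in foo:
--             foo.append(temp1)
--         if temp2 not in foo:
--             foo.append(temp2)
--     return foo
-- ===== SOURCE B (Python) =====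
-- def nearArea(current_location, dt):
--     # No membership scans: a perturbed copy can only collide with the base list
--     # (tracked by one boolean) or with its own index partner, decided in O(1).
--     out = []
--     seen_base = False
--     for i in range(len(current_location)):
--         x = current_location[i]
--         up = x + dt
--         down = dt if x - dt <= 0 else x - dt
--         if up != x or not seen_base:
--             out.append(current_location[:i] + [up] + current_location[i+1:])
--             if up == x:
--                 seen_base = True
--         if down != up and (down != x or not seen_base):
--             out.append(current_location[:i] + [down] + current_location[i+1:])
--             if down == x:
--                 seen_base = True
--     return out
-- ===== Notes on version B (the rewrite author's own statement) =====
-- stated objective: faster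
-- what changed: B removes A's list-membership dedup scans entirely: it decides duplication per candidate in O(1) by the structural fact that a one-position perturbed copy can only collide with the base list (tracked by one boolean) or with its own index partner, and builds copies by slicing instead of copy-and-assign.
import Mathlib
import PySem

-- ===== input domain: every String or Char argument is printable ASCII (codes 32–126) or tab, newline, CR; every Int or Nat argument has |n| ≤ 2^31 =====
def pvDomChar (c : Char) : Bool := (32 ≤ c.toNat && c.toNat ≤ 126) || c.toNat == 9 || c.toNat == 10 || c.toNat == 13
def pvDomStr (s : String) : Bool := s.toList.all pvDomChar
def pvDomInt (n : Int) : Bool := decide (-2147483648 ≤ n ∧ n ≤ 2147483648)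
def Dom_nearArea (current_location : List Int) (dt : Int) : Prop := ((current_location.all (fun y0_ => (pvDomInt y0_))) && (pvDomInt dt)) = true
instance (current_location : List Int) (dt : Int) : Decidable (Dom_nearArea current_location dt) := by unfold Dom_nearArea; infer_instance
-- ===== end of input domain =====

-- B replaces A's list-membership dedup by an O(1) arithmetic duplicate test per candidate
-- (a perturbed copy can only collide with the base list or its own index partner) — "alternative".

-- ===== PORT A =====
def stepA (loc : List Int) (dt : Int) (foo : List (List Int)) (i : Nat) : List (List Int) :=
  let temp1 := loc.set i (loc.getD i 0 + dt)
  let v := loc.getD i 0 - dt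
  let temp2 := loc.set i (if v < 0 ∨ v = 0 then dt else v)
  let foo1 := if temp1 ∈ foo then foo else foo ++ [temp1]
  if temp2 ∈ foo1 then foo1 else foo1 ++ [temp2]

def nearArea (current_location : List Int) (dt : Int) : List (List Int) :=
  (List.range current_location.length).foldl (stepA current_location dt) []

-- ===== PORT B =====
def stepB (loc : List Int) (dt : Int) (st : List (List Int) × Bool) (i : Nat) : List (List Int) × Bool :=
  let x := loc.getD i 0
  let up := x + dt
  let down := if x - dt ≤ 0 then dt else x - dt
  let st1 := if up ≠ x ∨ st.2 = false then
      (st.1 ++ [loc.take i ++ up :: loc.drop (i+1)], if up = x then true else st.2)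
    else st
  if down ≠ up ∧ (down ≠ x ∨ st1.2 = false) then
      (st1.1 ++ [loc.take i ++ down :: loc.drop (i+1)], if down = x then true else st1.2)
    else st1

def nearArea_alt (current_location : List Int) (dt : Int) : List (List Int) :=
  ((List.range current_location.length).foldl (stepB current_location dt) ([], false)).1

-- ===== PRECONDITION & SPEC =====
def Spec_nearArea (current_location : List Int) (dt : Int) (out : List (List Int)) : Prop := out = nearArea_alt current_location dt
instance (current_location : List Int) (dt : Int) (out : List (List Int)) : Decidable (Spec_nearArea current_location dt out) := by unfold Spec_nearArea; infer_instance

-- ===== CLAIM (what is proved, stated in full; the proofs are below) =====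
def Claim_equal_nearArea : Prop := ∀ (current_location : List Int) (dt : Int), Dom_nearArea current_location dt → Spec_nearArea current_location dt (nearArea current_location dt)

-- ===== LEMMAS AND PROOFS =====

-- every element of the accumulator is the base list with one position below a overwritten
def LocInv (loc : List Int) (a : Nat) (foo : List (List Int)) : Prop :=
  ∀ y ∈ foo, ∃ j, j < a ∧ ∃ v, y = loc.set j v

theorem getD_set_self (loc : List Int) (a : Nat) (ha : a < loc.length) (u : Int) :
    (loc.set a u).getD a 0 = u := by simp [List.getD, ha]

theorem getD_set_ne (loc : List Int) (a j : Nat) (hne : j ≠ a) (v : Int) :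
    (loc.set j v).getD a 0 = loc.getD a 0 := by
  simp [List.getD, List.getElem?_set_ne hne]

theorem set_self_iff (loc : List Int) (a : Nat) (ha : a < loc.length) (u : Int) :
    loc.set a u = loc ↔ u = loc.getD a 0 := by
  constructor
  · intro h
    have := congrArg (fun l => l.getD a 0) h
    simp only [getD_set_self loc a ha] at this
    exact this
  · intro h
    rw [h]
    simp [List.getD, List.getElem?_eq_getElem ha, List.set_getElem_self]

theorem set_inj_iff (loc : List Int) (a : Nat) (ha : a < loc.length) (u v : Int) :
    loc.set a u = loc.set a v ↔ u = v := by
  constructor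
  · intro h
    have := congrArg (fun l => l.getD a 0) h
    simp only [getD_set_self loc a ha] at this
    exact this
  · intro h; rw [h]

theorem mem_of_inv (loc : List Int) (a : Nat) (ha : a < loc.length) (foo : List (List Int))
    (hf : LocInv loc a foo) (u : Int) (hm : loc.set a u ∈ foo) : u = loc.getD a 0 := by
  obtain ⟨j, hj, v, hv⟩ := hf _ hm
  have hja : j ≠ a := by omega
  have := congrArg (fun l => l.getD a 0) hv
  simp only [getD_set_self loc a ha, getD_set_ne loc a j hja] at this
  exact this

-- one loop iteration: states stay equal, the boolean tracks membership of the base list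
theorem step_main (loc : List Int) (dt : Int) (a : Nat) (foo : List (List Int)) (s : Bool)
    (ha : a < loc.length) (hs : s = true ↔ loc ∈ foo) (hf : LocInv loc a foo) :
    (stepB loc dt (foo, s) a).1 = stepA loc dt foo a
    ∧ ((stepB loc dt (foo, s) a).2 = true ↔ loc ∈ stepA loc dt foo a)
    ∧ LocInv loc (a + 1) (stepA loc dt foo a) := by
  have hx := List.getD_eq_getElem loc 0 ha
  set x := loc.getD a 0 with hxdef
  set u := x + dt with hu
  set d : Int := if x - dt ≤ 0 then dt else x - dt with hd
  have hclamp : (if x - dt < 0 ∨ x - dt = 0 then dt else x - dt) = d := by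
    by_cases h : x - dt ≤ 0
    · rw [if_pos (by omega), hd, if_pos h]
    · rw [if_neg (by omega), hd, if_neg h]
  have htk : ∀ w : Int, loc.take a ++ w :: loc.drop (a+1) = loc.set a w := by
    intro w; rw [List.set_eq_take_append_cons_drop, if_pos ha]
  -- membership of temp1 in foo
  have h1 : loc.set a u ∈ foo ↔ (u = x ∧ s = true) := by
    constructor
    · intro h
      have hux := mem_of_inv loc a ha foo hf u h
      refine ⟨hux, hs.mpr ?_⟩
      rwa [(set_self_iff loc a ha u).mpr hux] at h
    · rintro ⟨hux, hst⟩
      rw [(set_self_iff loc a ha u).mpr hux]; exact hs.mp hst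
  -- foo1 on the A side
  set foo1 := if loc.set a u ∈ foo then foo else foo ++ [loc.set a u] with hfoo1
  have hT1mem : loc.set a u ∈ foo1 := by
    rw [hfoo1]; split
    · assumption
    · simp
  have hInv1 : LocInv loc (a+1) foo1 := by
    intro y hy
    rw [hfoo1] at hy
    have : y ∈ foo ∨ y = loc.set a u := by
      by_cases h : loc.set a u ∈ foo
      · rw [if_pos h] at hy; exact Or.inl hy
      · rw [if_neg h] at hy; simpa using hy
    rcases this with h | h
    · obtain ⟨j, hj, v, hv⟩ := hf _ h; exact ⟨j, by omega, v, hv⟩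
    · exact ⟨a, by omega, u, h⟩
  -- B side first stage
  have hcond1 : (u ≠ x ∨ s = false) ↔ loc.set a u ∉ foo := by
    rw [h1]
    rcases s with _ | _ <;> simp
  set s1 : Bool := if loc.set a u ∈ foo then s else (if u = x then true else s) with hs1
  have hB1 : (if u ≠ x ∨ s = false then
        (foo ++ [loc.take a ++ u :: loc.drop (a+1)], if u = x then true else s)
      else ((foo : List (List Int)), s)) = (foo1, s1) := by
    by_cases h : loc.set a u ∈ foo
    · rw [if_neg (by rw [hcond1]; simpa using h), hfoo1, if_pos h, hs1, if_pos h]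
    · rw [if_pos (hcond1.mpr h), hfoo1, if_neg h, hs1, if_neg h, htk]
  have hs1base : s1 = true ↔ loc ∈ foo1 := by
    rw [hs1, hfoo1]
    by_cases h : loc.set a u ∈ foo
    · rw [if_pos h, if_pos h, hs]
    · rw [if_neg h, if_neg h]
      by_cases hux : u = x
      · rw [if_pos hux]
        simp [List.mem_append, (set_self_iff loc a ha u).mpr hux]
      · rw [if_neg hux]
        have hne1 : loc.set a u ≠ loc := fun hc => hux ((set_self_iff loc a ha u).mp hc)
        simp [List.mem_append, Ne.symm hne1, hs]
  -- membership of temp2 in foo1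
  have h2 : loc.set a d ∈ foo1 ↔ (d = u ∨ (d = x ∧ s1 = true)) := by
    constructor
    · intro h
      rw [hfoo1] at h
      have hsplit : loc.set a d ∈ foo ∨ loc.set a d = loc.set a u := by
        by_cases hm : loc.set a u ∈ foo
        · rw [if_pos hm] at h; exact Or.inl h
        · rw [if_neg hm] at h; simpa using h
      rcases hsplit with h | h
      · have hdx := mem_of_inv loc a ha foo hf d h
        have hbase : loc ∈ foo := by rwa [(set_self_iff loc a ha d).mpr hdx] at h
        have hsb : s = true := hs.mpr hbase
        have hs1t : s1 = true := by
          rw [hs1]; split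
          · exact hsb
          · split
            · rfl
            · exact hsb
        exact Or.inr ⟨hdx, hs1t⟩
      · exact Or.inl ((set_inj_iff loc a ha d u).mp h)
    · rintro (h | ⟨hdx, hst⟩)
      · rw [h]; exact hT1mem
      · rw [(set_self_iff loc a ha d).mpr hdx]; exact hs1base.mp hst
  have hcond2 : (d ≠ u ∧ (d ≠ x ∨ s1 = false)) ↔ loc.set a d ∉ foo1 := by
    rw [h2]
    rcases s1 with _ | _ <;> simp
  set foo2 := if loc.set a d ∈ foo1 then foo1 else foo1 ++ [loc.set a d] with hfoo2
  set s2 : Bool := if loc.set a d ∈ foo1 then s1 else (if d = x then true else s1) with hs2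
  have hB2 : (if d ≠ u ∧ (d ≠ x ∨ s1 = false) then
        (foo1 ++ [loc.take a ++ d :: loc.drop (a+1)], if d = x then true else s1)
      else (foo1, s1)) = (foo2, s2) := by
    by_cases h : loc.set a d ∈ foo1
    · rw [if_neg (by rw [hcond2]; simpa using h), hfoo2, if_pos h, hs2, if_pos h]
    · rw [if_pos (hcond2.mpr h), hfoo2, if_neg h, hs2, if_neg h, htk]
  have hs2base : s2 = true ↔ loc ∈ foo2 := by
    rw [hs2, hfoo2]
    by_cases h : loc.set a d ∈ foo1
    · rw [if_pos h, if_pos h, hs1base]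
    · rw [if_neg h, if_neg h]
      by_cases hdx : d = x
      · rw [if_pos hdx]
        simp [List.mem_append, (set_self_iff loc a ha d).mpr hdx]
      · rw [if_neg hdx]
        have hne : loc.set a d ≠ loc := fun hc => hdx ((set_self_iff loc a ha d).mp hc)
        simp [List.mem_append, Ne.symm hne, hs1base]
  have hInv2 : LocInv loc (a+1) foo2 := by
    intro y hy
    rw [hfoo2] at hy
    have : y ∈ foo1 ∨ y = loc.set a d := by
      by_cases h : loc.set a d ∈ foo1
      · rw [if_pos h] at hy; exact Or.inl hy
      · rw [if_neg h] at hy; simpa using hy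
    rcases this with h | h
    · exact hInv1 _ h
    · exact ⟨a, by omega, d, h⟩
  -- assemble
  have hA : stepA loc dt foo a = foo2 := by
    rw [stepA]
    simp only [← hxdef, ← hu, hclamp, ← hfoo1, ← hfoo2]
  have hB : stepB loc dt (foo, s) a = (foo2, s2) := by
    rw [stepB]
    simp only [← hxdef, ← hu, ← hd]
    rw [hB1]
    exact hB2
  refine ⟨by rw [hB, hA], by rw [hB, hA]; exact hs2base, by rw [hA]; exact hInv2⟩

-- fold over a contiguous index range keeps the two states equal
theorem fold_main (loc : List Int) (dt : Int) :
    ∀ (b a : Nat) (foo : List (List Int)) (s : Bool), a + b ≤ loc.length →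
    (s = true ↔ loc ∈ foo) → LocInv loc a foo →
    ((List.range' a b).foldl (stepB loc dt) (foo, s)).1
        = (List.range' a b).foldl (stepA loc dt) foo
    ∧ (((List.range' a b).foldl (stepB loc dt) (foo, s)).2 = true
        ↔ loc ∈ (List.range' a b).foldl (stepA loc dt) foo)
    ∧ LocInv loc (a + b) ((List.range' a b).foldl (stepA loc dt) foo) := by
  intro b
  induction b with
  | zero => intro a foo s _ hs hf; exact ⟨rfl, hs, hf⟩
  | succ n ih =>
    intro a foo s hab hs hf
    have ha : a < loc.length := by omega
    obtain ⟨he, hsb, hinv⟩ := step_main loc dt a foo s ha hs hf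
    have hpair : stepB loc dt (foo, s) a
        = ((stepB loc dt (foo, s) a).1, (stepB loc dt (foo, s) a).2) := rfl
    rw [List.range'_succ]
    simp only [List.foldl_cons]
    rw [hpair, he] at *
    obtain ⟨e1, e2, e3⟩ := ih (a+1) (stepA loc dt foo a) (stepB loc dt (foo, s) a).2
      (by omega) (by rw [hsb]) hinv
    refine ⟨e1, e2, ?_⟩
    have : a + 1 + n = a + (n + 1) := by omega
    rwa [this] at e3

-- ===== VERDICT (by name: the statement is the Claim_ definition above) =====
theorem nearArea_spec : Claim_equal_nearArea := by
  intro loc dt _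
  unfold Spec_nearArea nearArea nearArea_alt
  rw [List.range_eq_range']
  exact (fold_main loc dt loc.length 0 [] false (by omega) (by simp) (by intro y hy; simp at hy)).1.symm
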